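-- pv_equiv track=rewrite | github.com/jaewoong2/Algo-python | 2021_summer_vacation/DongbinBook.py | curriculum
-- ===== SOURCE A (Python) =====
-- def curriculum(n, lectures):
--     times = {i + 1: lecture[0] for i, lecture in enumerate(lectures)}
--     prerequisites = {i + 1: [x for x in lecture[1]] for i, lecture in enumerate(lectures)}
--     queue = []
--     results = {i + 1: 0 for i in range(n)}
--     visited = []
--
--     for i, lecture in enumerate(lectures):
--         if len(prerequisites[i + 1]) == 0:
--             queue.append([i + 1, times[i + 1]])
--             visited.append(i + 1)
--
--     while queue:
--         v, cost = queue.pop(0)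
--         results[v] = cost
--
--         for i, lecture in enumerate(lectures):
--             if v in prerequisites[i + 1]:
--
--                 prerequisites[i + 1].pop(prerequisites[i + 1].index(v))
--                 if len(prerequisites[i + 1]) == 0 and i + 1 not in visited:
--                     queue.append([i + 1, cost + times[i + 1]])
--                     visited.append(i + 1)
--
--     return results
-- ===== SOURCE B (Python) =====
-- def curriculum(n, lectures):
--     # Kahn's algorithm with reverse adjacency + indegree counters and a
--     # head-pointer FIFO: no rescan of all lectures per processed node.
--     m = len(lectures)
--     times = {}
--     indeg = {}
--     adj = {}
--     for i, (t, ps) in enumerate(lectures):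
--         times[i + 1] = t
--         indeg[i + 1] = len(ps)
--         for x in ps:
--             adj.setdefault(x, []).append(i + 1)
--     results = {i + 1: 0 for i in range(n)}
--     queue = [(i + 1, times[i + 1]) for i in range(m) if indeg[i + 1] == 0]
--     head = 0
--     while head < len(queue):
--         v, cost = queue[head]
--         head += 1
--         results[v] = cost
--         for u in adj.get(v, []):
--             indeg[u] -= 1
--             if indeg[u] == 0:
--                 queue.append((u, cost + times[u]))
--     return results
-- ===== Notes on version B (the rewrite author's own statement) =====
-- stated objective: alternative
-- what changed: Replaces A's per-pop rescan of all lectures (membership test plus list.index/pop on each prerequisite list, and an O(n) queue.pop(0)) by Kahn's algorithm: a reverse-adjacency dict and integer indegree counters built once, with a head-pointer FIFO, processing nodes in the same order.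
-- outside the precondition, e.g. on curriculum(2, [(1, []), (2, [1, 1])]): A returns {1: 1, 2: 0}, B returns {1: 1, 2: 3}
import Mathlib
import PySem

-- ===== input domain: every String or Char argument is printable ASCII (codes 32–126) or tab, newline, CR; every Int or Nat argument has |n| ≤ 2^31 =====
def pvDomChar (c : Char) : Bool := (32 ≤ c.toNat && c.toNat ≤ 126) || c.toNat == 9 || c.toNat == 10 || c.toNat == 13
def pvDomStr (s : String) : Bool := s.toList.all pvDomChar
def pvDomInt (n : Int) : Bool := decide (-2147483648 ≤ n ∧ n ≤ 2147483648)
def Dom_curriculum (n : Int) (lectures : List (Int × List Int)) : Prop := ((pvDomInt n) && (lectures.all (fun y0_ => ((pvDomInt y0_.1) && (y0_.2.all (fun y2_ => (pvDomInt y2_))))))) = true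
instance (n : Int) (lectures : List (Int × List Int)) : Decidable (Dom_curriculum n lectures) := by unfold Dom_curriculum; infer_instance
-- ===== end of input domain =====

-- B replaces A's per-pop rescan of every lecture (with list.index/pop and queue.pop(0))
-- by Kahn's algorithm: reverse adjacency + indegree counters + head-pointer FIFO.

-- ===== PORT A =====

-- {i+1: f(lecture) for i, lecture in enumerate(lectures)}  (shared shape of A's two dict comprehensions)
def pvDictOfLectures {β : Type} (f : Int × List Int → β) (lectures : List (Int × List Int)) : PySem.Dict Int β :=
  (PySem.List.enumerate lectures 0).foldl (fun d p => d.insert (p.1 + 1) (f p.2)) PySem.Dict.empty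

-- results = {i+1: 0 for i in range(n)}  (identical in A and in B's source)
def pvResultsInit (n : Int) : PySem.Dict Int Int :=
  (PySem.List.pyRange 0 n 1).foldl (fun d i => d.insert (i + 1) (0 : Int)) PySem.Dict.empty

-- A's first for-loop: build queue and visited
def pvInitA (lectures : List (Int × List Int)) (times : PySem.Dict Int Int)
    (pr : PySem.Dict Int (List Int)) : List (Int × Int) × List Int :=
  (PySem.List.enumerate lectures 0).foldl
    (fun st p =>
      if ((pr.get? (p.1 + 1)).getD []).length = 0 then
        (st.1 ++ [(p.1 + 1, (times.get? (p.1 + 1)).getD 0)], st.2 ++ [p.1 + 1])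
      else st)
    ([], [])

-- A's inner for-loop (one pop of (v, cost)); state = (queue-after-pop, prerequisites, visited)
def pvStepA (lectures : List (Int × List Int)) (times : PySem.Dict Int Int) (v cost : Int)
    (st : List (Int × Int) × PySem.Dict Int (List Int) × List Int) :
    List (Int × Int) × PySem.Dict Int (List Int) × List Int :=
  (PySem.List.enumerate lectures 0).foldl
    (fun st p =>
      let lst := (st.2.1.get? (p.1 + 1)).getD []
      if v ∈ lst then
        -- lst.pop(lst.index(v)) removes the first occurrence of v; exact since v ∈ lst
        let lst' := (PySem.List.remove? lst v).getD []
        let pr' := st.2.1.insert (p.1 + 1) lst'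
        if lst'.length = 0 ∧ (p.1 + 1) ∉ st.2.2 then
          (st.1 ++ [(p.1 + 1, cost + (times.get? (p.1 + 1)).getD 0)], pr', st.2.2 ++ [p.1 + 1])
        else (st.1, pr', st.2.2)
      else st)
    st

-- A's while-loop; fuel only makes it total: lectures.length + 1 always exceeds the
-- number of pops (each enqueue appends a fresh element of {1..len} to visited)
def pvLoopA (lectures : List (Int × List Int)) (times : PySem.Dict Int Int) :
    Nat → List (Int × Int) → PySem.Dict Int (List Int) → List Int → PySem.Dict Int Int → PySem.Dict Int Int
  | 0, _, _, _, res => res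
  | _ + 1, [], _, _, res => res
  | fuel + 1, (v, cost) :: rest, pr, vis, res =>
      let st := pvStepA lectures times v cost (rest, pr, vis)
      pvLoopA lectures times fuel st.1 st.2.1 st.2.2 (res.insert v cost)

def curriculum (n : Int) (lectures : List (Int × List Int)) : List (Int × Int) :=
  let times := pvDictOfLectures (fun lec => lec.1) lectures
  let pr := pvDictOfLectures (fun lec => lec.2) lectures
  let res := pvResultsInit n
  let qv := pvInitA lectures times pr
  (pvLoopA lectures times (lectures.length + 1) qv.1 pr qv.2 res).items

-- ===== PORT B =====

-- B's single build loop: times, indeg, adj (adj.setdefault(x, []).append(i+1))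
def pvBuildB (lectures : List (Int × List Int)) :
    PySem.Dict Int Int × PySem.Dict Int Int × PySem.Dict Int (List Int) :=
  (PySem.List.enumerate lectures 0).foldl
    (fun st p =>
      (st.1.insert (p.1 + 1) p.2.1,
       st.2.1.insert (p.1 + 1) (p.2.2.length : Int),
       p.2.2.foldl (fun d x => d.insert x (d.getD x [] ++ [p.1 + 1])) st.2.2))
    (PySem.Dict.empty, PySem.Dict.empty, PySem.Dict.empty)

-- queue = [(i+1, times[i+1]) for i in range(m) if indeg[i+1] == 0]
def pvInitB (m : Nat) (times indeg : PySem.Dict Int Int) : List (Int × Int) :=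
  (List.range m).filterMap
    (fun (i : Nat) =>
      if indeg.getD ((i : Int) + 1) 0 = 0 then some (((i : Int) + 1, times.getD ((i : Int) + 1) 0)) else none)

-- B's inner for-loop over adj.get(v, []); state = (pending queue, indeg)
def pvStepB (times : PySem.Dict Int Int) (cost : Int) (deps : List Int)
    (st : List (Int × Int) × PySem.Dict Int Int) : List (Int × Int) × PySem.Dict Int Int :=
  deps.foldl
    (fun st u =>
      let d := st.2.getD u 0 - 1
      let indeg' := st.2.insert u d
      if d = 0 then (st.1 ++ [(u, cost + times.getD u 0)], indeg') else (st.1, indeg'))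
    st

-- B's while-loop over the head-pointer FIFO (pending = queue[head:]); fuel as in A
def pvLoopB (times : PySem.Dict Int Int) (adj : PySem.Dict Int (List Int)) :
    Nat → List (Int × Int) → PySem.Dict Int Int → PySem.Dict Int Int → PySem.Dict Int Int
  | 0, _, _, res => res
  | _ + 1, [], _, res => res
  | fuel + 1, (v, cost) :: rest, indeg, res =>
      let st := pvStepB times cost (adj.getD v []) (rest, indeg)
      pvLoopB times adj fuel st.1 st.2 (res.insert v cost)

def curriculum_alt (n : Int) (lectures : List (Int × List Int)) : List (Int × Int) :=
  let b := pvBuildB lectures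
  let res := pvResultsInit n
  let q := pvInitB lectures.length b.1 b.2.1
  (pvLoopB b.1 b.2.2 (lectures.length + 1) q b.2.1 res).items

-- ===== PRECONDITION & SPEC =====
-- Pre_ excludes lectures listing the same prerequisite twice: such an entry is malformed
-- input, and whether a duplicated prerequisite must be satisfied once or twice is a corner
-- nobody specifies — A's remove-one-occurrence bookkeeping counts it twice (the course
-- keeps completion time 0), B's indegree decrement per dependence edge counts it per listing.
def Pre_curriculum (n : Int) (lectures : List (Int × List Int)) : Prop :=
  ∀ p ∈ lectures, p.2.Nodup
instance (n : Int) (lectures : List (Int × List Int)) : Decidable (Pre_curriculum n lectures) := by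
  unfold Pre_curriculum; infer_instance

def pvWitness_curriculum : Int × (List (Int × List Int)) := (3, [(10, [3]), (5, []), (7, [2, 1])])

def Spec_curriculum (n : Int) (lectures : List (Int × List Int)) (out : List (Int × Int)) : Prop := out = curriculum_alt n lectures
instance (n : Int) (lectures : List (Int × List Int)) (out : List (Int × Int)) : Decidable (Spec_curriculum n lectures out) := by unfold Spec_curriculum; infer_instance

-- ===== CLAIM (what is proved, stated in full; the proofs are below) =====
def Claim_equal_curriculum : Prop := ∀ (n : Int) (lectures : List (Int × List Int)), Dom_curriculum n lectures → Pre_curriculum n lectures → Spec_curriculum n lectures (curriculum n lectures)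

-- ===== LEMMAS AND PROOFS =====

-- remaining prerequisite list of a course, after the nodes of P have been popped
def pvLP (P l : List Int) : List Int := l.filter (fun x => decide (x ∉ P))

theorem mem_pvLP {P l : List Int} {x : Int} : x ∈ pvLP P l ↔ x ∈ l ∧ x ∉ P := by
  simp [pvLP]

theorem pvLP_nil (l : List Int) : pvLP [] l = l := by simp [pvLP]

theorem pvLP_append (P l : List Int) (v : Int) :
    pvLP (P ++ [v]) l = (pvLP P l).filter (fun x => decide (x ≠ v)) := by
  simp only [pvLP, List.filter_filter]
  apply List.filter_congr
  intro x _
  by_cases h1 : x ∈ P <;> by_cases h2 : x = v <;> simp [h1, h2]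

theorem nodup_pvLP {l : List Int} (h : l.Nodup) (P : List Int) : (pvLP P l).Nodup :=
  h.filter _

theorem pvLP_append_of_not_mem {P l : List Int} {v : Int} (hv : v ∉ l) :
    pvLP (P ++ [v]) l = pvLP P l := by
  rw [pvLP_append]
  apply List.filter_eq_self.mpr
  intro a ha
  have : a ∈ l := (mem_pvLP.mp ha).1
  simp only [decide_eq_true_eq]
  intro h; exact hv (h ▸ this)

theorem pvLP_append_nil {P l : List Int} {v : Int} (h : pvLP P l = []) :
    pvLP (P ++ [v]) l = [] := by rw [pvLP_append, h]; rfl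

theorem pvLP_erase {P l : List Int} {v : Int} (hnd : l.Nodup) :
    (pvLP P l).erase v = pvLP (P ++ [v]) l := by
  rw [(nodup_pvLP hnd P).erase_eq_filter, pvLP_append]
  apply List.filter_congr
  intro x _
  by_cases h : x = v <;> simp [h, bne]

theorem pvLP_length_erase {P l : List Int} {v : Int} (hnd : l.Nodup) (hv : v ∈ pvLP P l) :
    (pvLP (P ++ [v]) l).length + 1 = (pvLP P l).length := by
  rw [← pvLP_erase hnd]
  have h1 := List.length_erase_of_mem hv
  have h2 : 0 < (pvLP P l).length := List.length_pos_of_mem hv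
  omega

theorem pvLP_all_eq {P l : List Int} {v : Int} (hne : pvLP P l ≠ [])
    (h : pvLP (P ++ [v]) l = []) : v ∈ pvLP P l := by
  rw [pvLP_append] at h
  obtain ⟨x, hx⟩ := List.exists_mem_of_ne_nil _ hne
  have hx2 := List.filter_eq_nil_iff.mp h x hx
  simp only [decide_eq_true_eq, not_not] at hx2
  exact hx2 ▸ hx

-- the items (node, completion time) enqueued while popping v, and the nodes marked visited
def pvNew (P : List Int) (v cost : Int) (l : List (Int × List Int)) (s : Int) : List (Int × Int) :=
  (PySem.List.enumerate l s).filterMap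
    (fun p => if v ∈ p.2.2 ∧ pvLP (P ++ [v]) p.2.2 = [] then some (p.1 + 1, cost + p.2.1) else none)

def pvNewVis (P : List Int) (v : Int) (l : List (Int × List Int)) (s : Int) : List Int :=
  (PySem.List.enumerate l s).filterMap
    (fun p => if v ∈ p.2.2 ∧ pvLP (P ++ [v]) p.2.2 = [] then some (p.1 + 1) else none)

def pvInitQ (l : List (Int × List Int)) : List (Int × Int) :=
  (PySem.List.enumerate l 0).filterMap
    (fun p => if p.2.2 = [] then some (p.1 + 1, p.2.1) else none)

def pvInitV (l : List (Int × List Int)) : List Int :=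
  (PySem.List.enumerate l 0).filterMap
    (fun p => if p.2.2 = [] then some (p.1 + 1) else none)

-- generic facts about (enumerate l s).filterMap (if c then some (index+1) else none)
theorem enum_fm_mem (c : Int × Int × List Int → Prop) [DecidablePred c]
    (l : List (Int × List Int)) (k : Nat) (hk : k < l.length) :
    (((k : Int) + 1) ∈ (PySem.List.enumerate l 0).filterMap
        (fun p => if c p then some (p.1 + 1) else none)) ↔ c ((k : Int), l[k]) := by
  constructor
  · intro h
    obtain ⟨p, hp, he⟩ := List.mem_filterMap.mp h
    obtain ⟨j, hj, rfl⟩ := (PySem.List.mem_enumerate_iff _ _ _).mp hp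
    simp only [zero_add] at he
    by_cases hc : c ((j : Int), l[j])
    · rw [if_pos hc] at he
      have : (j : Int) + 1 = (k : Int) + 1 := by injection he
      have hjk : j = k := by omega
      subst hjk
      exact hc
    · rw [if_neg hc] at he
      exact absurd he (by simp)
  · intro hc
    apply List.mem_filterMap.mpr
    refine ⟨((k : Int), l[k]), ?_, ?_⟩
    · exact (PySem.List.mem_enumerate_iff _ _ _).mpr ⟨k, hk, by simp⟩
    · simp [hc]

theorem enum_fm_nodup (c : Int × Int × List Int → Prop) [DecidablePred c]
    (l : List (Int × List Int)) (s : Int) :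
    ((PySem.List.enumerate l s).filterMap
        (fun p => if c p then some (p.1 + 1) else none)).Nodup := by
  have hp := PySem.List.pairwise_lt_enumerate l s
  have hlt : ((PySem.List.enumerate l s).filterMap
      (fun p => if c p then some (p.1 + 1) else none)).Pairwise (· < ·) := by
    rw [List.pairwise_filterMap]
    refine hp.imp ?_
    intro a b hab x hx y hy
    split at hx
    · split at hy
      · simp only [Option.some.injEq] at hx hy
        omega
      · simp at hy
    · simp at hx
  exact hlt.imp (fun h => by omega)

theorem enum_fm_elim {β : Type} (c : Int × Int × List Int → Prop) [DecidablePred c]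
    (f : Int × Int × List Int → β) (l : List (Int × List Int)) (x : β)
    (hx : x ∈ (PySem.List.enumerate l 0).filterMap
        (fun p => if c p then some (f p) else none)) :
    ∃ (k : Nat) (hk : k < l.length), x = f ((k : Int), l[k]) ∧ c ((k : Int), l[k]) := by
  obtain ⟨p, hp, he⟩ := List.mem_filterMap.mp hx
  obtain ⟨j, hj, rfl⟩ := (PySem.List.mem_enumerate_iff _ _ _).mp hp
  simp only [zero_add] at he
  by_cases hc : c ((j : Int), l[j])
  · rw [if_pos hc] at he
    exact ⟨j, hj, (Option.some.inj he).symm, hc⟩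
  · rw [if_neg hc] at he
    exact absurd he (by simp)

theorem map_fst_pvNew (P : List Int) (v cost : Int) (l : List (Int × List Int)) (s : Int) :
    (pvNew P v cost l s).map Prod.fst = pvNewVis P v l s := by
  simp only [pvNew, pvNewVis, List.map_filterMap]
  apply List.filterMap_congr
  intro p _
  by_cases h : v ∈ p.2.2 ∧ pvLP (P ++ [v]) p.2.2 = [] <;> simp [h]

theorem map_fst_pvInitQ (l : List (Int × List Int)) :
    (pvInitQ l).map Prod.fst = pvInitV l := by
  simp only [pvInitQ, pvInitV, List.map_filterMap]
  apply List.filterMap_congr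
  intro p _
  by_cases h : p.2.2 = [] <;> simp [h]

-- lookups in the dict comprehensions {i+1: f(lecture)}
theorem get?_pvDictOfLectures {β : Type} (f : Int × List Int → β) (l : List (Int × List Int))
    (k : Nat) (hk : k < l.length) :
    (pvDictOfLectures f l).get? ((k : Int) + 1) = some (f l[k]) := by
  have hkeys : (((PySem.List.enumerate l 0).map (fun p => p.1 + 1)) : List Int).Nodup := by
    have := PySem.List.pairwise_lt_enumerate l 0
    have h2 : ((PySem.List.enumerate l 0).map (fun p => p.1 + 1)).Pairwise (· < ·) :=
      this.map _ (fun a b hab => by omega)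
    exact h2.imp (fun h => by omega)
  have hitems : (pvDictOfLectures f l).items
      = PySem.Dict.empty.items ++ (PySem.List.enumerate l 0).map (fun p => (p.1 + 1, f p.2)) := by
    unfold pvDictOfLectures
    exact PySem.Dict.items_foldl_insert_fresh (PySem.List.enumerate l 0)
      (fun p => p.1 + 1) (fun p => f p.2) PySem.Dict.empty (by intro a _; simp) hkeys
  have hmem : (((k : Int) + 1, f l[k])) ∈ (pvDictOfLectures f l).items := by
    rw [hitems]
    apply List.mem_append_right
    apply List.mem_map.mpr
    exact ⟨((k : Int), l[k]), (PySem.List.mem_enumerate_iff _ _ _).mpr ⟨k, hk, by simp⟩, by simp⟩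
  refine PySem.Dict.get?_of_mem_items _ hmem ?_
  show ((pvDictOfLectures f l).items.map Prod.fst).Nodup
  rw [hitems]
  simpa [List.map_map, Function.comp] using hkeys

-- adjacency dict of B, factored out of pvBuildB
def pvAdj (l : List (Int × List Int)) : PySem.Dict Int (List Int) :=
  (PySem.List.enumerate l 0).foldl
    (fun a p => p.2.2.foldl (fun d x => d.insert x (d.getD x [] ++ [p.1 + 1])) a)
    PySem.Dict.empty

theorem buildB_eq (l : List (Int × List Int)) :
    pvBuildB l = (pvDictOfLectures (fun lec => lec.1) l,
      pvDictOfLectures (fun lec => (lec.2.length : Int)) l, pvAdj l) := by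
  suffices h : ∀ (l' : List (Int × List Int)) (s : Int) (t i : PySem.Dict Int Int)
      (a : PySem.Dict Int (List Int)),
      (PySem.List.enumerate l' s).foldl
        (fun st p =>
          (st.1.insert (p.1 + 1) p.2.1,
           st.2.1.insert (p.1 + 1) (p.2.2.length : Int),
           p.2.2.foldl (fun d x => d.insert x (d.getD x [] ++ [p.1 + 1])) st.2.2)) (t, i, a)
      = ((PySem.List.enumerate l' s).foldl (fun d p => d.insert (p.1 + 1) p.2.1) t,
         (PySem.List.enumerate l' s).foldl (fun d p => d.insert (p.1 + 1) (p.2.2.length : Int)) i,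
         (PySem.List.enumerate l' s).foldl
           (fun a p => p.2.2.foldl (fun d x => d.insert x (d.getD x [] ++ [p.1 + 1])) a) a) by
    unfold pvBuildB pvDictOfLectures pvAdj
    exact h l 0 _ _ _
  intro l'
  induction l' with
  | nil => intro s t i a; simp [PySem.List.enumerate_nil]
  | cons hd tl ih =>
      intro s t i a
      simp only [PySem.List.enumerate_cons, List.foldl_cons]
      exact ih (s + 1) _ _ _

theorem adj_inner (ps : List Int) (hnd : ps.Nodup) :
    ∀ (i : Int) (d : PySem.Dict Int (List Int)) (x : Int),
    (ps.foldl (fun d y => d.insert y (d.getD y [] ++ [i])) d).getD x []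
      = d.getD x [] ++ (if x ∈ ps then [i] else []) := by
  induction ps with
  | nil => intro i d x; simp
  | cons y t ih =>
      intro i d x
      simp only [List.foldl_cons]
      rw [ih hnd.of_cons i _ x]
      by_cases hxy : x = y
      · subst hxy
        have hxt : x ∉ t := (List.nodup_cons.mp hnd).1
        rw [PySem.Dict.getD_insert]
        simp [hxt]
      · rw [PySem.Dict.getD_insert]
        simp only [hxy, if_false]
        by_cases hxt : x ∈ t <;> simp [hxt, hxy]

theorem adj_getD_aux : ∀ (l : List (Int × List Int)) (s : Int)
    (d : PySem.Dict Int (List Int)) (x : Int),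
    (∀ p ∈ l, p.2.Nodup) →
    ((PySem.List.enumerate l s).foldl
        (fun a p => p.2.2.foldl (fun d x => d.insert x (d.getD x [] ++ [p.1 + 1])) a) d).getD x []
      = d.getD x []
        ++ (PySem.List.enumerate l s).filterMap (fun p => if x ∈ p.2.2 then some (p.1 + 1) else none) := by
  intro l
  induction l with
  | nil => intro s d x _; simp [PySem.List.enumerate_nil]
  | cons hd tl ih =>
      intro s d x hnd
      simp only [PySem.List.enumerate_cons, List.foldl_cons, List.filterMap_cons]
      rw [ih (s + 1) _ x (fun p hp => hnd p (List.mem_cons_of_mem _ hp))]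
      rw [adj_inner hd.2 (hnd hd (List.mem_cons_self)) (s + 1) d x]
      by_cases hx : x ∈ hd.2 <;> simp [hx]

theorem adj_getD (l : List (Int × List Int)) (hnd : ∀ p ∈ l, p.2.Nodup) (x : Int) :
    (pvAdj l).getD x []
      = (PySem.List.enumerate l 0).filterMap (fun p => if x ∈ p.2.2 then some (p.1 + 1) else none) := by
  unfold pvAdj
  rw [adj_getD_aux l 0 PySem.Dict.empty x hnd]
  simp

-- characterisation of A's initial for-loop
theorem initA_char : ∀ (l : List (Int × List Int)) (s : Int) (q : List (Int × Int))
    (w : List Int) (pr : PySem.Dict Int (List Int)) (times : PySem.Dict Int Int),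
    (∀ (k : Nat) (hk : k < l.length), pr.get? (s + (k : Int) + 1) = some l[k].2) →
    (∀ (k : Nat) (hk : k < l.length), times.get? (s + (k : Int) + 1) = some l[k].1) →
    (PySem.List.enumerate l s).foldl
      (fun st p =>
        if ((pr.get? (p.1 + 1)).getD []).length = 0 then
          (st.1 ++ [(p.1 + 1, (times.get? (p.1 + 1)).getD 0)], st.2 ++ [p.1 + 1])
        else st)
      (q, w)
    = (q ++ (PySem.List.enumerate l s).filterMap
          (fun p => if p.2.2 = [] then some (p.1 + 1, p.2.1) else none),
       w ++ (PySem.List.enumerate l s).filterMap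
          (fun p => if p.2.2 = [] then some (p.1 + 1) else none)) := by
  intro l
  induction l with
  | nil => intro s q w pr times _ _; simp [PySem.List.enumerate_nil]
  | cons hd tl ih =>
      intro s q w pr times hpr ht
      have hpr0 := hpr 0 (by simp)
      have ht0 := ht 0 (by simp)
      simp only [Nat.cast_zero, add_zero, List.getElem_cons_zero] at hpr0 ht0
      have hprS : ∀ (k : Nat) (hk : k < tl.length), pr.get? (s + 1 + (k : Int) + 1) = some tl[k].2 := by
        intro k hk
        have := hpr (k + 1) (by simpa using Nat.succ_lt_succ hk)
        simpa [add_assoc, add_comm, add_left_comm] using this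
      have htS : ∀ (k : Nat) (hk : k < tl.length), times.get? (s + 1 + (k : Int) + 1) = some tl[k].1 := by
        intro k hk
        have := ht (k + 1) (by simpa using Nat.succ_lt_succ hk)
        simpa [add_assoc, add_comm, add_left_comm] using this
      simp only [PySem.List.enumerate_cons, List.foldl_cons, List.filterMap_cons]
      rw [hpr0, ht0]
      by_cases he : hd.2 = []
      · simp only [Option.getD_some, he, List.length_nil, if_pos]
        rw [ih (s + 1) _ _ pr times hprS htS]
        simp [List.append_assoc]
      · have : ¬ ((hd.2 : List Int).length = 0) := by
          simpa [List.length_eq_zero_iff] using he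
        simp only [Option.getD_some, this, if_false, he, if_false]
        exact ih (s + 1) _ _ pr times hprS htS

-- generalised form of A's inner for-loop, for any enumeration start s
def pvStepAGen (times : PySem.Dict Int Int) (v cost : Int) (l : List (Int × List Int)) (s : Int)
    (st : List (Int × Int) × PySem.Dict Int (List Int) × List Int) :
    List (Int × Int) × PySem.Dict Int (List Int) × List Int :=
  (PySem.List.enumerate l s).foldl
    (fun st p =>
      let lst := (st.2.1.get? (p.1 + 1)).getD []
      if v ∈ lst then
        let lst' := (PySem.List.remove? lst v).getD []
        let pr' := st.2.1.insert (p.1 + 1) lst'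
        if lst'.length = 0 ∧ (p.1 + 1) ∉ st.2.2 then
          (st.1 ++ [(p.1 + 1, cost + (times.get? (p.1 + 1)).getD 0)], pr', st.2.2 ++ [p.1 + 1])
        else (st.1, pr', st.2.2)
      else st)
    st

theorem pvStepA_eq_gen (lectures : List (Int × List Int)) (times : PySem.Dict Int Int)
    (v cost : Int) (st : List (Int × Int) × PySem.Dict Int (List Int) × List Int) :
    pvStepA lectures times v cost st = pvStepAGen times v cost lectures 0 st := rfl

theorem stepA_char (v cost : Int) (P : List Int) (times : PySem.Dict Int Int) (hvP : v ∉ P) :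
    ∀ (l : List (Int × List Int)) (s : Int) (q : List (Int × Int))
      (pr : PySem.Dict Int (List Int)) (vis : List Int),
    (∀ p ∈ l, p.2.Nodup) →
    (∀ (k : Nat) (hk : k < l.length), pr.get? (s + (k : Int) + 1) = some (pvLP P l[k].2)) →
    (∀ (k : Nat) (hk : k < l.length), times.get? (s + (k : Int) + 1) = some l[k].1) →
    (∀ (k : Nat) (hk : k < l.length), ((s + (k : Int) + 1) ∈ vis ↔ pvLP P l[k].2 = [])) →
    (pvStepAGen times v cost l s (q, pr, vis)).1 = q ++ pvNew P v cost l s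
    ∧ (pvStepAGen times v cost l s (q, pr, vis)).2.2 = vis ++ pvNewVis P v l s
    ∧ (∀ (k : Nat) (hk : k < l.length),
        (pvStepAGen times v cost l s (q, pr, vis)).2.1.get? (s + (k : Int) + 1)
          = some (pvLP (P ++ [v]) l[k].2))
    ∧ (∀ κ : Int, κ < s + 1 → (pvStepAGen times v cost l s (q, pr, vis)).2.1.get? κ = pr.get? κ) := by
  intro l
  induction l with
  | nil =>
      intro s q pr vis _ _ _ _
      refine ⟨by simp [pvStepAGen, pvNew, PySem.List.enumerate_nil],
        by simp [pvStepAGen, pvNewVis, PySem.List.enumerate_nil], ?_, ?_⟩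
      · intro k hk; exact absurd hk (by simp)
      · intro κ _; simp [pvStepAGen, PySem.List.enumerate_nil]
  | cons hd tl ih =>
      intro s q pr vis hnd hpr ht hvis
      have hndh : hd.2.Nodup := hnd hd List.mem_cons_self
      have hndt : ∀ p ∈ tl, p.2.Nodup := fun p hp => hnd p (List.mem_cons_of_mem _ hp)
      have hpr0 := hpr 0 (by simp)
      have ht0 := ht 0 (by simp)
      have hvis0 := hvis 0 (by simp)
      simp only [Nat.cast_zero, add_zero, List.getElem_cons_zero] at hpr0 ht0 hvis0
      have shiftPr : ∀ (pr' : PySem.Dict Int (List Int)) (Q : List Int),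
          (∀ (k : Nat) (hk : k < (hd :: tl).length), pr'.get? (s + (k : Int) + 1) = some (pvLP Q (hd :: tl)[k].2)) →
          (∀ (k : Nat) (hk : k < tl.length), pr'.get? (s + 1 + (k : Int) + 1) = some (pvLP Q tl[k].2)) := by
        intro pr' Q h k hk
        have := h (k + 1) (by simpa using Nat.succ_lt_succ hk)
        simpa [add_assoc, add_comm, add_left_comm] using this
      have htS : ∀ (k : Nat) (hk : k < tl.length), times.get? (s + 1 + (k : Int) + 1) = some tl[k].1 := by
        intro k hk
        have := ht (k + 1) (by simpa using Nat.succ_lt_succ hk)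
        simpa [add_assoc, add_comm, add_left_comm] using this
      -- unfold one step
      have hunf : pvStepAGen times v cost (hd :: tl) s (q, pr, vis)
          = pvStepAGen times v cost tl (s + 1)
              ((fun st p =>
                let lst := ((st.2.1 : PySem.Dict Int (List Int)).get? (p.1 + 1)).getD []
                if v ∈ lst then
                  let lst' := (PySem.List.remove? lst v).getD []
                  let pr' := st.2.1.insert (p.1 + 1) lst'
                  if lst'.length = 0 ∧ (p.1 + 1) ∉ st.2.2 then
                    (st.1 ++ [(p.1 + 1, cost + (times.get? (p.1 + 1)).getD 0)], pr', st.2.2 ++ [p.1 + 1])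
                  else (st.1, pr', st.2.2)
                else st) (q, pr, vis) (s, hd)) := by
        simp only [pvStepAGen, PySem.List.enumerate_cons, List.foldl_cons]
      by_cases hv : v ∈ hd.2
      · have hvlst : v ∈ pvLP P hd.2 := mem_pvLP.mpr ⟨hv, hvP⟩
        have hne : pvLP P hd.2 ≠ [] := List.ne_nil_of_mem hvlst
        have hrem : (PySem.List.remove? (pvLP P hd.2) v).getD [] = pvLP (P ++ [v]) hd.2 := by
          rw [PySem.List.remove?_eq_some_erase _ _ hvlst]
          simp only [Option.getD_some]
          exact pvLP_erase hndh
        have hnvis : (s + 1) ∉ vis := fun hmem => hne (hvis0.mp hmem)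
        by_cases hemp : pvLP (P ++ [v]) hd.2 = []
        · -- enqueue hd
          have hstep : pvStepAGen times v cost (hd :: tl) s (q, pr, vis)
              = pvStepAGen times v cost tl (s + 1)
                  (q ++ [(s + 1, cost + hd.1)], pr.insert (s + 1) (pvLP (P ++ [v]) hd.2), vis ++ [s + 1]) := by
            rw [hunf]
            simp only [hpr0, Option.getD_some, if_pos hvlst, hrem, ht0]
            have hc : (pvLP (P ++ [v]) hd.2).length = 0 ∧ (s + 1) ∉ vis :=
              ⟨by simp [hemp], hnvis⟩
            rw [if_pos hc]
          have hprS : ∀ (k : Nat) (hk : k < tl.length),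
              (pr.insert (s + 1) (pvLP (P ++ [v]) hd.2)).get? (s + 1 + (k : Int) + 1) = some (pvLP P tl[k].2) := by
            intro k hk
            rw [PySem.Dict.get?_insert]
            rw [if_neg (by omega)]
            exact shiftPr pr P hpr k hk
          have hvisS : ∀ (k : Nat) (hk : k < tl.length),
              ((s + 1 + (k : Int) + 1) ∈ vis ++ [s + 1] ↔ pvLP P tl[k].2 = []) := by
            intro k hk
            rw [List.mem_append, List.mem_singleton]
            have := hvis (k + 1) (by simpa using Nat.succ_lt_succ hk)
            simp only [Nat.cast_add, Nat.cast_one, List.getElem_cons_succ] at this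
            constructor
            · rintro (hmem | heq)
              · exact this.mp (by convert hmem using 2; ring)
              · exact absurd heq (by omega)
            · intro hh
              left
              have := this.mpr hh
              convert this using 2; ring
          obtain ⟨ihq, ihvis, ihpr, ihkeep⟩ :=
            ih (s + 1) (q ++ [(s + 1, cost + hd.1)]) (pr.insert (s + 1) (pvLP (P ++ [v]) hd.2))
              (vis ++ [s + 1]) hndt hprS htS hvisS
          refine ⟨?_, ?_, ?_, ?_⟩
          · rw [hstep, ihq]
            simp only [pvNew, PySem.List.enumerate_cons, List.filterMap_cons]
            rw [if_pos ⟨hv, hemp⟩]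
            simp [List.append_assoc]
          · rw [hstep, ihvis]
            simp only [pvNewVis, PySem.List.enumerate_cons, List.filterMap_cons]
            rw [if_pos ⟨hv, hemp⟩]
            simp [List.append_assoc]
          · intro k hk
            rw [hstep]
            match k with
            | 0 =>
                simp only [Nat.cast_zero, add_zero, List.getElem_cons_zero]
                rw [ihkeep (s + 1) (by omega)]
                rw [PySem.Dict.get?_insert]
                simp [hemp]
            | k + 1 =>
                have := ihpr k (by simpa using Nat.lt_of_succ_lt_succ hk)
                simp only [List.getElem_cons_succ]
                convert this using 3
                push_cast; ring
          · intro κ hκ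
            rw [hstep, ihkeep κ (by omega)]
            rw [PySem.Dict.get?_insert]
            rw [if_neg (by omega)]
        · -- v removed but hd not yet ready
          have hstep : pvStepAGen times v cost (hd :: tl) s (q, pr, vis)
              = pvStepAGen times v cost tl (s + 1)
                  (q, pr.insert (s + 1) (pvLP (P ++ [v]) hd.2), vis) := by
            rw [hunf]
            simp only [hpr0, Option.getD_some, if_pos hvlst, hrem]
            have hc : ¬ ((pvLP (P ++ [v]) hd.2).length = 0 ∧ (s + 1) ∉ vis) := by
              intro hcontra
              exact hemp (List.length_eq_zero_iff.mp hcontra.1)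
            rw [if_neg hc]
          have hprS : ∀ (k : Nat) (hk : k < tl.length),
              (pr.insert (s + 1) (pvLP (P ++ [v]) hd.2)).get? (s + 1 + (k : Int) + 1) = some (pvLP P tl[k].2) := by
            intro k hk
            rw [PySem.Dict.get?_insert, if_neg (by omega)]
            exact shiftPr pr P hpr k hk
          have hvisS : ∀ (k : Nat) (hk : k < tl.length),
              ((s + 1 + (k : Int) + 1) ∈ vis ↔ pvLP P tl[k].2 = []) := by
            intro k hk
            have := hvis (k + 1) (by simpa using Nat.succ_lt_succ hk)
            simp only [Nat.cast_add, Nat.cast_one, List.getElem_cons_succ] at this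
            constructor
            · intro hmem; exact this.mp (by convert hmem using 2; ring)
            · intro hh; have := this.mpr hh; convert this using 2; ring
          obtain ⟨ihq, ihvis, ihpr, ihkeep⟩ :=
            ih (s + 1) q (pr.insert (s + 1) (pvLP (P ++ [v]) hd.2)) vis hndt hprS htS hvisS
          refine ⟨?_, ?_, ?_, ?_⟩
          · rw [hstep, ihq]
            simp only [pvNew, PySem.List.enumerate_cons, List.filterMap_cons]
            rw [if_neg (fun h => hemp h.2)]
          · rw [hstep, ihvis]
            simp only [pvNewVis, PySem.List.enumerate_cons, List.filterMap_cons]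
            rw [if_neg (fun h => hemp h.2)]
          · intro k hk
            rw [hstep]
            match k with
            | 0 =>
                simp only [Nat.cast_zero, add_zero, List.getElem_cons_zero]
                rw [ihkeep (s + 1) (by omega)]
                rw [PySem.Dict.get?_insert]
                simp
            | k + 1 =>
                have := ihpr k (by simpa using Nat.lt_of_succ_lt_succ hk)
                simp only [List.getElem_cons_succ]
                convert this using 3
                push_cast; ring
          · intro κ hκ
            rw [hstep, ihkeep κ (by omega)]
            rw [PySem.Dict.get?_insert, if_neg (by omega)]
      · -- v not a prerequisite of hd
        have hvlst : v ∉ pvLP P hd.2 := fun h => hv (mem_pvLP.mp h).1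
        have hstep : pvStepAGen times v cost (hd :: tl) s (q, pr, vis)
            = pvStepAGen times v cost tl (s + 1) (q, pr, vis) := by
          rw [hunf]
          simp only [hpr0, Option.getD_some, if_neg hvlst]
        have hvisS : ∀ (k : Nat) (hk : k < tl.length),
            ((s + 1 + (k : Int) + 1) ∈ vis ↔ pvLP P tl[k].2 = []) := by
          intro k hk
          have := hvis (k + 1) (by simpa using Nat.succ_lt_succ hk)
          simp only [Nat.cast_add, Nat.cast_one, List.getElem_cons_succ] at this
          constructor
          · intro hmem; exact this.mp (by convert hmem using 2; ring)
          · intro hh; have := this.mpr hh; convert this using 2; ring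
        obtain ⟨ihq, ihvis, ihpr, ihkeep⟩ :=
          ih (s + 1) q pr vis hndt (shiftPr pr P hpr) htS hvisS
        refine ⟨?_, ?_, ?_, ?_⟩
        · rw [hstep, ihq]
          simp only [pvNew, PySem.List.enumerate_cons, List.filterMap_cons]
          rw [if_neg (fun h => hv h.1)]
        · rw [hstep, ihvis]
          simp only [pvNewVis, PySem.List.enumerate_cons, List.filterMap_cons]
          rw [if_neg (fun h => hv h.1)]
        · intro k hk
          rw [hstep]
          match k with
          | 0 =>
              simp only [Nat.cast_zero, add_zero, List.getElem_cons_zero]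
              rw [ihkeep (s + 1) (by omega), hpr0]
              simp [pvLP_append_of_not_mem hv]
          | k + 1 =>
              have := ihpr k (by simpa using Nat.lt_of_succ_lt_succ hk)
              simp only [List.getElem_cons_succ]
              convert this using 3
              push_cast; ring
        · intro κ hκ
          rw [hstep, ihkeep κ (by omega)]

theorem stepB_char (v cost : Int) (P : List Int) (times : PySem.Dict Int Int) (hvP : v ∉ P) :
    ∀ (l : List (Int × List Int)) (s : Int) (q : List (Int × Int)) (indeg : PySem.Dict Int Int),
    (∀ p ∈ l, p.2.Nodup) →
    (∀ (k : Nat) (hk : k < l.length), indeg.get? (s + (k : Int) + 1) = some ((pvLP P l[k].2).length : Int)) →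
    (∀ (k : Nat) (hk : k < l.length), times.get? (s + (k : Int) + 1) = some l[k].1) →
    (pvStepB times cost
        ((PySem.List.enumerate l s).filterMap (fun p => if v ∈ p.2.2 then some (p.1 + 1) else none))
        (q, indeg)).1 = q ++ pvNew P v cost l s
    ∧ (∀ (k : Nat) (hk : k < l.length),
        (pvStepB times cost
          ((PySem.List.enumerate l s).filterMap (fun p => if v ∈ p.2.2 then some (p.1 + 1) else none))
          (q, indeg)).2.get? (s + (k : Int) + 1) = some ((pvLP (P ++ [v]) l[k].2).length : Int))
    ∧ (∀ κ : Int, κ < s + 1 →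
        (pvStepB times cost
          ((PySem.List.enumerate l s).filterMap (fun p => if v ∈ p.2.2 then some (p.1 + 1) else none))
          (q, indeg)).2.get? κ = indeg.get? κ) := by
  intro l
  induction l with
  | nil =>
      intro s q indeg _ _ _
      refine ⟨by simp [pvStepB, pvNew, PySem.List.enumerate_nil], ?_, ?_⟩
      · intro k hk; exact absurd hk (by simp)
      · intro κ _; simp [pvStepB, PySem.List.enumerate_nil]
  | cons hd tl ih =>
      intro s q indeg hnd hind ht
      have hndh : hd.2.Nodup := hnd hd List.mem_cons_self
      have hndt : ∀ p ∈ tl, p.2.Nodup := fun p hp => hnd p (List.mem_cons_of_mem _ hp)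
      have hind0 := hind 0 (by simp)
      have ht0 := ht 0 (by simp)
      simp only [Nat.cast_zero, add_zero, List.getElem_cons_zero] at hind0 ht0
      have shiftInd : ∀ (d : PySem.Dict Int Int) (Q : List Int),
          (∀ (k : Nat) (hk : k < (hd :: tl).length), d.get? (s + (k : Int) + 1) = some ((pvLP Q (hd :: tl)[k].2).length : Int)) →
          (∀ (k : Nat) (hk : k < tl.length), d.get? (s + 1 + (k : Int) + 1) = some ((pvLP Q tl[k].2).length : Int)) := by
        intro d Q h k hk
        have := h (k + 1) (by simpa using Nat.succ_lt_succ hk)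
        simpa [add_assoc, add_comm, add_left_comm] using this
      have htS : ∀ (k : Nat) (hk : k < tl.length), times.get? (s + 1 + (k : Int) + 1) = some tl[k].1 := by
        intro k hk
        have := ht (k + 1) (by simpa using Nat.succ_lt_succ hk)
        simpa [add_assoc, add_comm, add_left_comm] using this
      by_cases hv : v ∈ hd.2
      · have hvlst : v ∈ pvLP P hd.2 := mem_pvLP.mpr ⟨hv, hvP⟩
        have hlen := pvLP_length_erase hndh hvlst
        have hd0 : indeg.getD (s + 1) 0 - 1 = ((pvLP (P ++ [v]) hd.2).length : Int) := by
          rw [PySem.Dict.getD_eq_get?_getD, hind0]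
          simp only [Option.getD_some]
          omega
        have hfm : (PySem.List.enumerate (hd :: tl) s).filterMap
              (fun p => if v ∈ p.2.2 then some (p.1 + 1) else none)
            = (s + 1) :: (PySem.List.enumerate tl (s + 1)).filterMap
              (fun p => if v ∈ p.2.2 then some (p.1 + 1) else none) := by
          simp only [PySem.List.enumerate_cons, List.filterMap_cons]
          rw [if_pos hv]
        have hindS : ∀ (k : Nat) (hk : k < tl.length),
            (indeg.insert (s + 1) (indeg.getD (s + 1) 0 - 1)).get? (s + 1 + (k : Int) + 1)
              = some ((pvLP P tl[k].2).length : Int) := by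
          intro k hk
          rw [PySem.Dict.get?_insert, if_neg (by omega)]
          exact shiftInd indeg P hind k hk
        by_cases hemp : pvLP (P ++ [v]) hd.2 = []
        · have hzero : indeg.getD (s + 1) 0 - 1 = 0 := by
            rw [hd0, hemp]; simp
          have hstep : pvStepB times cost ((PySem.List.enumerate (hd :: tl) s).filterMap
                (fun p => if v ∈ p.2.2 then some (p.1 + 1) else none)) (q, indeg)
              = pvStepB times cost ((PySem.List.enumerate tl (s + 1)).filterMap
                (fun p => if v ∈ p.2.2 then some (p.1 + 1) else none))
                (q ++ [(s + 1, cost + hd.1)], indeg.insert (s + 1) (indeg.getD (s + 1) 0 - 1)) := by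
            rw [hfm]
            simp only [pvStepB, List.foldl_cons]
            rw [if_pos hzero, PySem.Dict.getD_eq_get?_getD, ht0]
            rfl
          obtain ⟨ihq, ihind, ihkeep⟩ :=
            ih (s + 1) (q ++ [(s + 1, cost + hd.1)])
              (indeg.insert (s + 1) (indeg.getD (s + 1) 0 - 1)) hndt hindS htS
          refine ⟨?_, ?_, ?_⟩
          · rw [hstep, ihq]
            simp only [pvNew, PySem.List.enumerate_cons, List.filterMap_cons]
            rw [if_pos ⟨hv, hemp⟩]
            simp [List.append_assoc]
          · intro k hk
            rw [hstep]
            match k with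
            | 0 =>
                simp only [Nat.cast_zero, add_zero, List.getElem_cons_zero]
                rw [ihkeep (s + 1) (by omega)]
                rw [PySem.Dict.get?_insert]
                simp [hd0, hemp]
            | k + 1 =>
                have := ihind k (by simpa using Nat.lt_of_succ_lt_succ hk)
                simp only [List.getElem_cons_succ]
                convert this using 3
                push_cast; ring
          · intro κ hκ
            rw [hstep, ihkeep κ (by omega)]
            rw [PySem.Dict.get?_insert, if_neg (by omega)]
        · have hzero : ¬ (indeg.getD (s + 1) 0 - 1 = 0) := by
            rw [hd0]
            intro hcontra
            exact hemp (List.length_eq_zero_iff.mp (by exact_mod_cast hcontra))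
          have hstep : pvStepB times cost ((PySem.List.enumerate (hd :: tl) s).filterMap
                (fun p => if v ∈ p.2.2 then some (p.1 + 1) else none)) (q, indeg)
              = pvStepB times cost ((PySem.List.enumerate tl (s + 1)).filterMap
                (fun p => if v ∈ p.2.2 then some (p.1 + 1) else none))
                (q, indeg.insert (s + 1) (indeg.getD (s + 1) 0 - 1)) := by
            rw [hfm]
            simp only [pvStepB, List.foldl_cons]
            rw [if_neg hzero]
          obtain ⟨ihq, ihind, ihkeep⟩ :=
            ih (s + 1) q (indeg.insert (s + 1) (indeg.getD (s + 1) 0 - 1)) hndt hindS htS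
          refine ⟨?_, ?_, ?_⟩
          · rw [hstep, ihq]
            simp only [pvNew, PySem.List.enumerate_cons, List.filterMap_cons]
            rw [if_neg (fun h => hemp h.2)]
          · intro k hk
            rw [hstep]
            match k with
            | 0 =>
                simp only [Nat.cast_zero, add_zero, List.getElem_cons_zero]
                rw [ihkeep (s + 1) (by omega)]
                rw [PySem.Dict.get?_insert]
                simp [hd0]
            | k + 1 =>
                have := ihind k (by simpa using Nat.lt_of_succ_lt_succ hk)
                simp only [List.getElem_cons_succ]
                convert this using 3
                push_cast; ring
          · intro κ hκ
            rw [hstep, ihkeep κ (by omega)]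
            rw [PySem.Dict.get?_insert, if_neg (by omega)]
      · -- v not a prerequisite of hd: hd contributes no adjacency entry
        have hfm : (PySem.List.enumerate (hd :: tl) s).filterMap
              (fun p => if v ∈ p.2.2 then some (p.1 + 1) else none)
            = (PySem.List.enumerate tl (s + 1)).filterMap
              (fun p => if v ∈ p.2.2 then some (p.1 + 1) else none) := by
          simp only [PySem.List.enumerate_cons, List.filterMap_cons]
          rw [if_neg hv]
        obtain ⟨ihq, ihind, ihkeep⟩ := ih (s + 1) q indeg hndt (shiftInd indeg P hind) htS
        refine ⟨?_, ?_, ?_⟩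
        · rw [hfm, ihq]
          simp only [pvNew, PySem.List.enumerate_cons, List.filterMap_cons]
          rw [if_neg (fun h => hv h.1)]
        · intro k hk
          rw [hfm]
          match k with
          | 0 =>
              simp only [Nat.cast_zero, add_zero, List.getElem_cons_zero]
              rw [ihkeep (s + 1) (by omega), hind0]
              rw [pvLP_append_of_not_mem hv]
          | k + 1 =>
              have := ihind k (by simpa using Nat.lt_of_succ_lt_succ hk)
              simp only [List.getElem_cons_succ]
              convert this using 3
              push_cast; ring
        · intro κ hκ
          rw [hfm, ihkeep κ (by omega)]

theorem filterMap_enum_range {β : Type} :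
    ∀ (l : List (Int × List Int)) (s : Int) (h : Int × Int × List Int → Option β),
    (PySem.List.enumerate l s).filterMap h
      = (List.range l.length).filterMap (fun (k : Nat) => h (s + (k : Int), l[k]!)) := by
  intro l
  induction l with
  | nil => intro s h; simp [PySem.List.enumerate_nil]
  | cons hd tl ih =>
      intro s h
      have htail : (List.range tl.length).filterMap
            ((fun (k : Nat) => h (s + (k : Int), (hd :: tl)[k]!)) ∘ (· + 1))
          = (List.range tl.length).filterMap (fun (k : Nat) => h (s + 1 + (k : Int), tl[k]!)) := by
        apply List.filterMap_congr
        intro k _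
        simp only [Function.comp_apply]
        have e1 : s + ((k + 1 : Nat) : Int) = s + 1 + (k : Int) := by push_cast; ring
        have e2 : (hd :: tl)[k + 1]! = tl[k]! := by
          simp [List.getElem!_eq_getElem?_getD]
        rw [e1, e2]
      simp only [List.length_cons]
      rw [List.range_succ_eq_map, List.filterMap_cons, List.filterMap_map, htail, ← ih (s + 1)]
      have e0 : h (s + ((0 : Nat) : Int), (hd :: tl)[(0 : Nat)]!) = h (s, hd) := by
        simp
      rw [e0]
      simp only [PySem.List.enumerate_cons, List.filterMap_cons]

theorem initB_eq (l : List (Int × List Int)) :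
    pvInitB l.length (pvDictOfLectures (fun lec => lec.1) l)
      (pvDictOfLectures (fun lec => (lec.2.length : Int)) l) = pvInitQ l := by
  unfold pvInitB pvInitQ
  rw [filterMap_enum_range l 0 (fun p => if p.2.2 = [] then some (p.1 + 1, p.2.1) else none)]
  apply List.filterMap_congr
  intro k hk
  have hklt : k < l.length := List.mem_range.mp hk
  have hget : l[k]! = l[k] := getElem!_pos l k hklt
  have h1 : (pvDictOfLectures (fun lec => (lec.2.length : Int)) l).getD ((k : Int) + 1) 0
      = (l[k].2.length : Int) := by
    rw [PySem.Dict.getD_eq_get?_getD, get?_pvDictOfLectures _ l k hklt]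
    rfl
  have h2 : (pvDictOfLectures (fun lec => lec.1) l).getD ((k : Int) + 1) 0 = l[k].1 := by
    rw [PySem.Dict.getD_eq_get?_getD, get?_pvDictOfLectures _ l k hklt]
    rfl
  simp only [zero_add, hget, h1, h2]
  by_cases he : l[k].2 = []
  · simp [he]
  · have hne : ¬ ((l[k].2.length : Int) = 0) := by
      simpa [Int.natCast_eq_zero, List.length_eq_zero_iff] using he
    simp [he]

theorem initA_eq (l : List (Int × List Int)) :
    pvInitA l (pvDictOfLectures (fun lec => lec.1) l) (pvDictOfLectures (fun lec => lec.2) l)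
      = (pvInitQ l, pvInitV l) := by
  unfold pvInitA pvInitQ pvInitV
  rw [initA_char l 0 [] [] (pvDictOfLectures (fun lec => lec.2) l)
    (pvDictOfLectures (fun lec => lec.1) l)
    (by intro k hk; simpa using get?_pvDictOfLectures (fun lec => lec.2) l k hk)
    (by intro k hk; simpa using get?_pvDictOfLectures (fun lec => lec.1) l k hk)]
  simp

theorem loop_sync (lectures : List (Int × List Int)) (hnd : ∀ p ∈ lectures, p.2.Nodup)
    (times : PySem.Dict Int Int)
    (ht : ∀ (k : Nat) (hk : k < lectures.length), times.get? ((k : Int) + 1) = some lectures[k].1) :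
    ∀ (fuel : Nat) (P : List Int) (pending : List (Int × Int))
      (pr : PySem.Dict Int (List Int)) (vis : List Int) (indeg : PySem.Dict Int Int)
      (res : PySem.Dict Int Int),
    (∀ u ∈ P, ∃ (k : Nat) (_ : k < lectures.length),
        u = (k : Int) + 1 ∧ pvLP P lectures[k].2 = []) →
    (∀ e ∈ pending, ∃ (k : Nat) (_ : k < lectures.length),
        e.1 = (k : Int) + 1 ∧ pvLP P lectures[k].2 = [] ∧ e.1 ∉ P) →
    ((pending.map Prod.fst).Nodup) →
    (∀ (k : Nat) (hk : k < lectures.length), pr.get? ((k : Int) + 1) = some (pvLP P lectures[k].2)) →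
    (∀ (k : Nat) (hk : k < lectures.length), (((k : Int) + 1) ∈ vis ↔ pvLP P lectures[k].2 = [])) →
    (∀ (k : Nat) (hk : k < lectures.length),
        indeg.get? ((k : Int) + 1) = some ((pvLP P lectures[k].2).length : Int)) →
    pvLoopA lectures times fuel pending pr vis res
      = pvLoopB times (pvAdj lectures) fuel pending indeg res := by
  intro fuel
  induction fuel with
  | zero =>
      intro P pending pr vis indeg res _ _ _ _ _ _
      simp [pvLoopA, pvLoopB]
  | succ fuel ih =>
      intro P pending pr vis indeg res hP hpend hq hpr hvis hind
      match pending with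
      | [] => simp [pvLoopA, pvLoopB]
      | (v, cost) :: rest =>
        obtain ⟨kv, hkv, hv1, hv2, hv3⟩ := hpend (v, cost) List.mem_cons_self
        simp only at hv1 hv3
        have hqc : v ∉ rest.map Prod.fst ∧ (rest.map Prod.fst).Nodup :=
          List.nodup_cons.mp (by simpa only [List.map_cons] using hq)
        obtain ⟨hAq, hAvis, hApr, hAkeep⟩ :=
          stepA_char v cost P times hv3 lectures 0 rest pr vis hnd
            (by intro k hk; simpa using hpr k hk)
            (by intro k hk; simpa using ht k hk)
            (by intro k hk; simpa using hvis k hk)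
        obtain ⟨hBq, hBind, hBkeep⟩ :=
          stepB_char v cost P times hv3 lectures 0 rest indeg hnd
            (by intro k hk; simpa using hind k hk)
            (by intro k hk; simpa using ht k hk)
        simp only [pvLoopA, pvLoopB, pvStepA_eq_gen, adj_getD lectures hnd v]
        rw [hAq, hAvis, hBq]
        have hvinP : v ∈ pvLP P lectures[kv].2 → False := fun hmem => by
          rw [hv2] at hmem; exact List.not_mem_nil hmem
        apply ih (P ++ [v])
        · -- popped-set invariant
          intro u hu
          rcases List.mem_append.mp hu with hu | hu
          · obtain ⟨k, hk, h1, h2⟩ := hP u hu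
            exact ⟨k, hk, h1, pvLP_append_nil h2⟩
          · rw [List.mem_singleton] at hu
            subst hu
            exact ⟨kv, hkv, hv1, pvLP_append_nil hv2⟩
        · -- pending invariant
          intro e he
          rcases List.mem_append.mp he with he | he
          · obtain ⟨k, hk, h1, h2, h3⟩ := hpend e (List.mem_cons_of_mem _ he)
            refine ⟨k, hk, h1, pvLP_append_nil h2, ?_⟩
            intro hmem
            rcases List.mem_append.mp hmem with hmem | hmem
            · exact h3 hmem
            · rw [List.mem_singleton] at hmem
              exact hqc.1 (hmem ▸ List.mem_map_of_mem he)
          · obtain ⟨k, hk, heq, hc⟩ :=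
              enum_fm_elim (fun p => v ∈ p.2.2 ∧ pvLP (P ++ [v]) p.2.2 = [])
                (fun p => (p.1 + 1, cost + p.2.1)) lectures e he
            simp only at heq hc
            refine ⟨k, hk, by rw [heq], hc.2, ?_⟩
            rw [heq]
            simp only
            intro hmem
            rcases List.mem_append.mp hmem with hmem | hmem
            · obtain ⟨k', hk', h1', h2'⟩ := hP _ hmem
              have hkk : k = k' := by omega
              subst hkk
              have : v ∈ pvLP P lectures[k].2 := mem_pvLP.mpr ⟨hc.1, hv3⟩
              rw [h2'] at this
              exact List.not_mem_nil this
            · rw [List.mem_singleton] at hmem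
              have hkk : k = kv := by omega
              subst hkk
              exact hvinP (mem_pvLP.mpr ⟨hc.1, hv3⟩)
        · -- pending keys distinct
          rw [List.map_append, map_fst_pvNew, List.nodup_append]
          refine ⟨hqc.2, ?_, ?_⟩
          · exact enum_fm_nodup (fun p => v ∈ p.2.2 ∧ pvLP (P ++ [v]) p.2.2 = []) lectures 0
          · intro a ha b hb heq
            obtain ⟨e, he, rfl⟩ := List.mem_map.mp ha
            subst heq
            obtain ⟨k, hk, h1, h2, h3⟩ := hpend e (List.mem_cons_of_mem _ he)
            obtain ⟨k', hk', heq', hc'⟩ :=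
              enum_fm_elim (fun p => v ∈ p.2.2 ∧ pvLP (P ++ [v]) p.2.2 = [])
                (fun p => p.1 + 1) lectures (e.1) (by simpa only [pvNewVis] using hb)
            simp only at heq' hc'
            have hkk : k = k' := by omega
            subst hkk
            have : v ∈ pvLP P lectures[k].2 := mem_pvLP.mpr ⟨hc'.1, hv3⟩
            rw [h2] at this
            exact List.not_mem_nil this
        · -- prerequisite lists
          intro k hk
          simpa using hApr k hk
        · -- visited
          intro k hk
          rw [List.mem_append]
          constructor
          · rintro (h | h)
            · exact pvLP_append_nil ((hvis k hk).mp h)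
            · have := (enum_fm_mem (fun p => v ∈ p.2.2 ∧ pvLP (P ++ [v]) p.2.2 = [])
                lectures k hk).mp (by simpa [pvNewVis] using h)
              exact this.2
          · intro h
            by_cases hP0 : pvLP P lectures[k].2 = []
            · exact Or.inl ((hvis k hk).mpr hP0)
            · refine Or.inr ?_
              have hvmem : v ∈ pvLP P lectures[k].2 := pvLP_all_eq hP0 h
              have := (enum_fm_mem (fun p => v ∈ p.2.2 ∧ pvLP (P ++ [v]) p.2.2 = [])
                lectures k hk).mpr ⟨(mem_pvLP.mp hvmem).1, h⟩
              simpa [pvNewVis] using this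
        · -- indegrees
          intro k hk
          simpa using hBind k hk

-- ===== VERDICT (by name: the statement is the Claim_ definition above) =====
theorem curriculum_spec : Claim_equal_curriculum := by
  intro n lectures _hdom hpre
  unfold Spec_curriculum curriculum curriculum_alt
  rw [buildB_eq]
  simp only [initA_eq, initB_eq]
  congr 1
  apply loop_sync lectures hpre (pvDictOfLectures (fun lec => lec.1) lectures)
    (fun k hk => get?_pvDictOfLectures (fun lec => lec.1) lectures k hk)
    (lectures.length + 1) [] (pvInitQ lectures)
  · intro u hu
    exact absurd hu (List.not_mem_nil)
  · intro e he
    obtain ⟨k, hk, heq, hc⟩ :=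
      enum_fm_elim (fun p => p.2.2 = []) (fun p => (p.1 + 1, p.2.1)) lectures e he
    simp only at heq hc
    exact ⟨k, hk, by rw [heq], by rw [pvLP_nil]; exact hc, by simp⟩
  · rw [map_fst_pvInitQ]
    exact enum_fm_nodup (fun p => p.2.2 = []) lectures 0
  · intro k hk
    rw [get?_pvDictOfLectures (fun lec => lec.2) lectures k hk, pvLP_nil]
  · intro k hk
    rw [pvLP_nil]
    exact enum_fm_mem (fun p => p.2.2 = []) lectures k hk
  · intro k hk
    rw [get?_pvDictOfLectures (fun lec => (lec.2.length : Int)) lectures k hk, pvLP_nil]
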